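-- pv_equiv track=rewrite | github.com/devisskz/Python | Algorithm Design/ps3pr4.py | jscore
-- ===== SOURCE A (Python) =====
-- def rem_first(elem, values):
--     """ removes the first occurrence of elem from the list values
--     """
--     if values == '':
--         return ''
--     elif values[0] == elem:             #from lecture, modified for string
--         return values[1:]
--     else:
--         result_rest = rem_first(elem, values[1:])
--         return values[0] + result_rest
--
-- def jscore(s1,s2):
--     """takes strings s1 and s2, returns Jotto score comparing them"""
--     if s1 == '' or s2 == '': #base case
--         return 0
--     else:
--         j_rest = jscore(s1[1:],rem_first(s1[0],s2)) #recursive call utilizes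
--                                         #the rem_frst function
--
--         if s1[0] in s2: #as given from notes/hints
--             return 1 + j_rest #returns count of letters
--         else:
--             return j_rest #otherwise, recursive call
-- ===== SOURCE B (Python) =====
-- def jscore(s1, s2):
--     """takes strings s1 and s2, returns Jotto score comparing them"""
--     xs = sorted(s1)
--     ys = sorted(s2)
--     i = j = n = 0
--     while i < len(xs) and j < len(ys):
--         if xs[i] == ys[j]:
--             n += 1
--             i += 1
--             j += 1
--         elif xs[i] < ys[j]:
--             i += 1
--         else:
--             j += 1
--     return n
-- ===== Notes on version B (the rewrite author's own statement) =====
-- stated objective: faster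
-- what changed: Replaced A's recursive first-occurrence removal (a linear rem_first scan inside a recursion over s1, plus string slicing) by sorting both strings once and counting common letters with a single two-pointer merge pass.
import Mathlib
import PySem

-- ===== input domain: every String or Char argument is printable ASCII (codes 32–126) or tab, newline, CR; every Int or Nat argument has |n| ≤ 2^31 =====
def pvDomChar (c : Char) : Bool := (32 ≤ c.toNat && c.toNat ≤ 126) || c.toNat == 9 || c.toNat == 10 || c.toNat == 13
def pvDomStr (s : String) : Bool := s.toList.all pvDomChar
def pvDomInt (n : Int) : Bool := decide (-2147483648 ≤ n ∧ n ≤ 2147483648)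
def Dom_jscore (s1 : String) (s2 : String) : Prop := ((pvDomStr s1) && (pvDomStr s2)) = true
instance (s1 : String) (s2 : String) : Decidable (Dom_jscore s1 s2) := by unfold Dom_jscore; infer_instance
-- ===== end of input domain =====

-- B sorts both strings once and counts common letters with a two-pointer merge,
-- replacing A's quadratic recursive first-occurrence removal (objective: faster).

-- ===== PORT A =====
-- rem_first(elem, values): recursion over the string (as List Char)
def remFirst (elem : Char) : List Char → List Char
  | [] => []
  | c :: rest => if c = elem then rest else c :: remFirst elem rest

def jscoreList : List Char → List Char → Int
  | [], _ => 0
  | _ :: _, [] => 0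
  | c :: t, l2 =>
    let jRest := jscoreList t (remFirst c l2)
    if c ∈ l2 then 1 + jRest else jRest

def jscore (s1 : String) (s2 : String) : Int :=
  jscoreList s1.toList s2.toList

-- ===== PORT B =====
-- the two-pointer while loop of Source B, as recursion on the two (sorted) lists
def mergeCount : List Char → List Char → Int
  | [], _ => 0
  | _ :: _, [] => 0
  | x :: xs, y :: ys =>
    if x = y then 1 + mergeCount xs ys
    else if x < y then mergeCount xs (y :: ys)
    else mergeCount (x :: xs) ys
termination_by xs ys => xs.length + ys.length

def jscore_alt (s1 : String) (s2 : String) : Int :=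
  mergeCount (PySem.List.sorted s1.toList (fun c => c) false)
             (PySem.List.sorted s2.toList (fun c => c) false)

-- ===== PRECONDITION & SPEC =====
def Spec_jscore (s1 : String) (s2 : String) (out : Int) : Prop := out = jscore_alt s1 s2
instance (s1 : String) (s2 : String) (out : Int) : Decidable (Spec_jscore s1 s2 out) := by unfold Spec_jscore; infer_instance

-- ===== CLAIM (what is proved, stated in full; the proofs are below) =====
def Claim_equal_jscore : Prop := ∀ (s1 : String) (s2 : String), Dom_jscore s1 s2 → Spec_jscore s1 s2 (jscore s1 s2)

-- ===== LEMMAS AND PROOFS =====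

lemma remFirst_eq_erase (e : Char) (l : List Char) : remFirst e l = l.erase e := by
  induction l with
  | nil => rfl
  | cons c rest ih =>
    by_cases h : c = e
    · simp [remFirst, h]
    · simp [remFirst, h, ih]

-- A computes the multiset-intersection cardinality
lemma jscoreList_card (l1 : List Char) : ∀ l2 : List Char,
    jscoreList l1 l2 = (((l1 : Multiset Char) ∩ (l2 : Multiset Char)).card : Int) := by
  induction l1 with
  | nil => intro l2; simp [jscoreList]
  | cons c t ih =>
    intro l2
    cases l2 with
    | nil => simp [jscoreList]
    | cons d r =>
      by_cases h : c ∈ d :: r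
      · have hmem : c ∈ ((d :: r : List Char) : Multiset Char) := by simpa using h
        rw [show ((c :: t : List Char) : Multiset Char) = c ::ₘ (t : Multiset Char) from rfl,
            Multiset.cons_inter_of_pos _ hmem]
        simp only [jscoreList, if_pos h, remFirst_eq_erase, ih]
        rw [show (((d :: r).erase c : List Char) : Multiset Char)
              = ((d :: r : List Char) : Multiset Char).erase c from
            (Multiset.coe_erase (d :: r) c).symm]
        simp
        omega
      · have hmem : c ∉ ((d :: r : List Char) : Multiset Char) := by simpa using h
        rw [show ((c :: t : List Char) : Multiset Char) = c ::ₘ (t : Multiset Char) from rfl,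
            Multiset.cons_inter_of_neg _ hmem]
        have herase : (d :: r).erase c = d :: r := List.erase_of_not_mem h
        simp only [jscoreList, if_neg h, remFirst_eq_erase, herase, ih]

-- B computes the same cardinality on sorted inputs
lemma mergeCount_card : ∀ (xs ys : List Char),
    xs.Pairwise (· ≤ ·) → ys.Pairwise (· ≤ ·) →
    mergeCount xs ys = (((xs : Multiset Char) ∩ (ys : Multiset Char)).card : Int) := by
  intro xs ys
  induction xs, ys using mergeCount.induct with
  | case1 ys => intro _ _; simp [mergeCount]
  | case2 x xs => intro _ _; simp [mergeCount]
  | case3 xs x ys ih =>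
    intro hx hy
    rw [show ((x :: xs : List Char) : Multiset Char) = x ::ₘ (xs : Multiset Char) from rfl,
        Multiset.cons_inter_of_pos _ (by simp : x ∈ ((x :: ys : List Char) : Multiset Char))]
    simp only [mergeCount]
    rw [ih hx.of_cons hy.of_cons]
    rw [show ((x :: ys : List Char) : Multiset Char) = x ::ₘ (ys : Multiset Char) from rfl,
        Multiset.erase_cons_head]
    simp
    omega
  | case4 x xs y ys hne hlt ih =>
    intro hx hy
    have hxnot : x ∉ ((y :: ys : List Char) : Multiset Char) := by
      simp only [Multiset.mem_coe, List.mem_cons]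
      rintro (rfl | hz)
      · exact lt_irrefl x hlt
      · exact absurd (hlt.trans_le ((List.pairwise_cons.mp hy).1 x hz)) (lt_irrefl x)
    rw [show ((x :: xs : List Char) : Multiset Char) = x ::ₘ (xs : Multiset Char) from rfl,
        Multiset.cons_inter_of_neg _ hxnot]
    simp only [mergeCount, if_neg hne, if_pos hlt]
    exact ih hx.of_cons hy
  | case5 x xs y ys hne hnlt ih =>
    intro hx hy
    have hygt : y < x := lt_of_le_of_ne (not_lt.mp hnlt) (fun h => hne h.symm)
    have hynot : y ∉ ((x :: xs : List Char) : Multiset Char) := by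
      simp only [Multiset.mem_coe, List.mem_cons]
      rintro (rfl | hz)
      · exact lt_irrefl y hygt
      · exact absurd (hygt.trans_le ((List.pairwise_cons.mp hx).1 y hz)) (lt_irrefl y)
    rw [Multiset.inter_comm,
        show ((y :: ys : List Char) : Multiset Char) = y ::ₘ (ys : Multiset Char) from rfl,
        Multiset.cons_inter_of_neg _ hynot, Multiset.inter_comm]
    simp only [mergeCount, if_neg hne, if_neg hnlt]
    exact ih hx hy.of_cons

lemma coe_sorted (l : List Char) :
    ((PySem.List.sorted l (fun c => c) false : List Char) : Multiset Char) = (l : Multiset Char) :=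
  Multiset.coe_eq_coe.mpr (PySem.List.sorted_perm l (fun c => c) false)

-- ===== VERDICT (by name: the statement is the Claim_ definition above) =====
theorem jscore_spec : Claim_equal_jscore := by
  intro s1 s2 _
  show jscore s1 s2 = jscore_alt s1 s2
  unfold jscore jscore_alt
  rw [jscoreList_card,
      mergeCount_card _ _ (PySem.List.sorted_pairwise s1.toList (fun c => c))
                          (PySem.List.sorted_pairwise s2.toList (fun c => c)),
      coe_sorted, coe_sorted]
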